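-- pv_equiv track=rewrite | github.com/NQBH/advanced_STEM_beyond | combinatorics/resource/LDL/Python/bai4_ArrayOfParents.py | fcns_representation
-- ===== SOURCE A (Python) =====
-- def fcns_representation(root, children, n):
--     first_child = [-1] * n
--     next_sibling = [-1] * n
--
--     def dfs(node):
--         if not children[node]:
--             return
--
--         first_child[node] = children[node][0]
--
--         for i in range(len(children[node]) - 1):
--             next_sibling[children[node][i]] = children[node][i + 1]
--         for child in children[node]:
--             dfs(child)
--
--     dfs(root)
--     return first_child, next_sibling
-- ===== SOURCE B (Python) =====
-- def fcns_representation(root, children, n):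
--     first_child = [-1] * n
--     next_sibling = [-1] * n
--
--     stack = [root]
--     while stack:
--         node = stack.pop()
--         cs = children[node]
--         if cs:
--             first_child[node] = cs[0]
--             for a, b in zip(cs, cs[1:]):
--                 next_sibling[a] = b
--             stack.extend(reversed(cs))
--
--     return first_child, next_sibling
-- ===== Notes on version B (the rewrite author's own statement) =====
-- stated objective: alternative
-- what changed: Replaces A's recursive nested dfs with an explicit-stack while loop (push children reversed so pop order equals A's preorder), and writes next_sibling by zipping consecutive siblings instead of indexing.
import Mathlib
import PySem

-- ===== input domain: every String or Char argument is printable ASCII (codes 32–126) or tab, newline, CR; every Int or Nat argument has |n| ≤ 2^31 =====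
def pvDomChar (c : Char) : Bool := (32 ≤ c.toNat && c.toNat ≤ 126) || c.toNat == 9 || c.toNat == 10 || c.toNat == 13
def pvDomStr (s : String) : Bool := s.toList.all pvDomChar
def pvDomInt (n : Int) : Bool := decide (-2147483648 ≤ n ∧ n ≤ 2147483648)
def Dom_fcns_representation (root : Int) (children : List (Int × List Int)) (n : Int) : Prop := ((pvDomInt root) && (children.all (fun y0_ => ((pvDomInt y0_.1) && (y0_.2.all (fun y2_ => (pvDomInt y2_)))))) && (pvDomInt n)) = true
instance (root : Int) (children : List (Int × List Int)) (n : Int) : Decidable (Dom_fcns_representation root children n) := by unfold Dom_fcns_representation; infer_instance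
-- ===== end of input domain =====

-- B replaces A's recursive dfs by an explicit-stack loop (same return value; A mutates
-- nothing observable). Both ports thread a fuel counter (one unit per dfs call / per pop);
-- the fuel bound pvFuel exceeds the number of root-to-node paths on every input admitted
-- by Pre_, and the equivalence proved below holds for every fuel value anyway.

-- ===== PORT A =====
-- fuel budget: (total children + 2)^(#entries + 2) exceeds the number of dfs calls
-- (= paths from root) whenever the reachable part of the graph is acyclic (Pre_)
def pvFuel (children : List (Int × List Int)) : Nat :=
  (children.foldl (fun a p => a + p.2.length) 0 + 2) ^ (children.length + 2)

mutual
-- literal port of A's nested 'dfs' (recursion on the tree, fuel threaded through the calls);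
-- children[node] (KeyError outside Pre_) ported as getD []; list assignment is pySetD
-- (exact, including negative-index wraparound, whenever the index is in Python's range)
def pvDfsA (children : List (Int × List Int)) :
    (fuel : Nat) → Int → List Int × List Int → {p : Nat × (List Int × List Int) // p.1 ≤ fuel}
  | 0, _, st => ⟨(0, st), Nat.le_refl 0⟩
  | fuel+1, node, st =>
    let cs := (PySem.Dict.mk children).getD node []
    if cs.isEmpty then ⟨(fuel, st), Nat.le_succ fuel⟩              -- if not children[node]: return
    else
      let fc := PySem.List.pySetD st.1 node (PySem.List.pyGetD cs 0 0)   -- first_child[node] = children[node][0]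
      let ns := (PySem.List.pyRange 0 ((cs.length : Int) - 1) 1).foldl   -- for i in range(len(..)-1): next_sibling[..[i]] = ..[i+1]
                  (fun a i => PySem.List.pySetD a (PySem.List.pyGetD cs i 0) (PySem.List.pyGetD cs (i+1) 0)) st.2
      let r := pvDfsAFold children fuel cs (fc, ns)                -- for child in children[node]: dfs(child)
      ⟨r.1, Nat.le_succ_of_le r.2⟩
termination_by fuel _ _ => (fuel, 0)
decreasing_by exact Prod.Lex.left _ _ (Nat.lt_succ_self fuel)
def pvDfsAFold (children : List (Int × List Int)) :
    (fuel : Nat) → List Int → List Int × List Int → {p : Nat × (List Int × List Int) // p.1 ≤ fuel}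
  | fuel, [], st => ⟨(fuel, st), Nat.le_refl fuel⟩
  | fuel, c :: rest, st =>
    let r := pvDfsA children fuel c st
    let r2 := pvDfsAFold children r.1.1 rest r.1.2
    ⟨r2.1, Nat.le_trans r2.2 r.2⟩
termination_by fuel l _ => (fuel, l.length + 1)
decreasing_by
  · exact Prod.Lex.right _ (Nat.succ_pos _)
  · rcases Nat.lt_or_ge r.1.1 fuel with h | h
    · exact Prod.Lex.left _ _ h
    · have heq : r.1.1 = fuel := Nat.le_antisymm r.2 h
      rw [heq]; exact Prod.Lex.right _ (Nat.lt_succ_self _)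
end

def fcns_representation (root : Int) (children : List (Int × List Int)) (n : Int) : List Int × List Int :=
  let first_child := List.replicate n.toNat (-1 : Int)   -- [-1] * n  (empty for n ≤ 0, as in Python)
  let next_sibling := List.replicate n.toNat (-1 : Int)
  (pvDfsA children (pvFuel children) root (first_child, next_sibling)).1.2

-- ===== PORT B =====
-- literal port of Source B's while-loop; the Lean list's head is the Python stack's top
-- (pop = head, stack.extend(reversed(cs)) = cs ++ rest), one fuel unit per pop
def pvRunB (children : List (Int × List Int)) :
    Nat → List Int → List Int × List Int → List Int × List Int
  | 0, _, st => st
  | _+1, [], st => st                                              -- while stack: ends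
  | fuel+1, node :: rest, st =>
    let cs := (PySem.Dict.mk children).getD node []                -- cs = children[node]
    if cs.isEmpty then pvRunB children fuel rest st
    else
      let fc := PySem.List.pySetD st.1 node (PySem.List.pyGetD cs 0 0)
      let ns := (cs.zip (cs.drop 1)).foldl                         -- for a, b in zip(cs, cs[1:])
                  (fun a p => PySem.List.pySetD a p.1 p.2) st.2
      pvRunB children fuel (cs ++ rest) (fc, ns)

def fcns_representation_alt (root : Int) (children : List (Int × List Int)) (n : Int) : List Int × List Int :=
  let first_child := List.replicate n.toNat (-1 : Int)
  let next_sibling := List.replicate n.toNat (-1 : Int)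
  pvRunB children (pvFuel children) [root] (first_child, next_sibling)

-- ===== PRECONDITION & SPEC =====
-- pvReachL computes plain graph reachability of the INPUT (the labels reachable from the
-- start labels through the children dict), independent of either port's algorithm
def pvKids (children : List (Int × List Int)) (x : Int) : List Int :=
  (PySem.Dict.mk children).getD x []
def pvStep (children : List (Int × List Int)) (s : List Int) : List Int :=
  PySem.Set.ofList (s ++ s.flatMap (pvKids children))
def pvReachL (children : List (Int × List Int)) (s : List Int) : List Int :=
  (pvStep children)^[children.foldl (fun a p => a + p.2.length) 0 + 1] s

-- Pre_ excludes exactly the inputs on which A raises — KeyError (a node reachable from root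
-- that is not a key of the dict), IndexError (an index A actually writes at — a reachable
-- node with children, or a non-last child — outside Python's index range [-n, n)), and
-- RecursionError (a cycle reachable from root); shared-child DAGs, duplicate children and
-- negative in-range labels (Python wraparound, matched by pySetD) are all admitted.
def Pre_fcns_representation (root : Int) (children : List (Int × List Int)) (n : Int) : Prop :=
  (∀ x ∈ pvReachL children [root],
      x ∈ children.map Prod.fst ∧
      (pvKids children x ≠ [] → -n ≤ x ∧ x < n) ∧
      (∀ c ∈ (pvKids children x).dropLast, -n ≤ c ∧ c < n)) ∧
  (∀ k ∈ pvReachL children [root], k ∉ pvReachL children (pvKids children k))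
instance (root : Int) (children : List (Int × List Int)) (n : Int) : Decidable (Pre_fcns_representation root children n) := by unfold Pre_fcns_representation; infer_instance

def pvWitness_fcns_representation : Int × (List (Int × List Int)) × Int :=
  (0, [(0, [1, 2]), (1, []), (2, [])], 3)

def Spec_fcns_representation (root : Int) (children : List (Int × List Int)) (n : Int) (out : List Int × List Int) : Prop := out = fcns_representation_alt root children n
instance (root : Int) (children : List (Int × List Int)) (n : Int) (out : List Int × List Int) : Decidable (Spec_fcns_representation root children n out) := by unfold Spec_fcns_representation; infer_instance

-- ===== CLAIM (what is proved, stated in full; the proofs are below) =====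
def Claim_equal_fcns_representation : Prop := ∀ (root : Int) (children : List (Int × List Int)) (n : Int), Dom_fcns_representation root children n → Pre_fcns_representation root children n → Spec_fcns_representation root children n (fcns_representation root children n)

-- ===== LEMMAS AND PROOFS =====

-- A's index-driven sibling loop performs exactly the writes of B's zip loop
lemma pv_sib_pairs (cs : List Int) :
    (PySem.List.pyRange 0 ((cs.length : Int) - 1) 1).map
      (fun i => (PySem.List.pyGetD cs i 0, PySem.List.pyGetD cs (i+1) 0))
    = cs.zip (cs.drop 1) := by
  apply List.ext_getElem
  · simp [PySem.List.length_pyRange_one]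
  · intro k h1 h2
    have hk : k < cs.length - 1 := by
      simp [PySem.List.length_pyRange_one] at h1; omega
    simp only [List.getElem_map, PySem.List.getElem_pyRange_one, List.getElem_zip,
      List.getElem_drop, Prod.mk.injEq, zero_add]
    constructor
    · rw [PySem.List.pyGetD_natCast]
      simp [List.getD_eq_getElem?_getD, List.getElem?_eq_getElem (by omega : k < cs.length)]
    · have hc : ((k : Int) + 1) = ((k + 1 : Nat) : Int) := by push_cast; ring
      rw [hc, PySem.List.pyGetD_natCast]
      simp [List.getD_eq_getElem?_getD, List.getElem?_eq_getElem (by omega : k + 1 < cs.length)]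
      congr 1
      omega

lemma pv_ns_eq (cs : List Int) (z : List Int) :
    (PySem.List.pyRange 0 ((cs.length : Int) - 1) 1).foldl
      (fun a i => PySem.List.pySetD a (PySem.List.pyGetD cs i 0) (PySem.List.pyGetD cs (i+1) 0)) z
    = (cs.zip (cs.drop 1)).foldl (fun a p => PySem.List.pySetD a p.1 p.2) z := by
  conv_rhs => rw [← pv_sib_pairs]
  rw [List.foldl_map]

-- unfolding equations for the mutual well-founded definition, as rewrite rules
lemma pv_dfsA_zero (children : List (Int × List Int)) (c : Int) (st : List Int × List Int) :
    (pvDfsA children 0 c st).1 = (0, st) := by simp [pvDfsA]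

lemma pv_dfsA_succ (children : List (Int × List Int)) (fuel : Nat) (node : Int)
    (st : List Int × List Int) :
    (pvDfsA children (fuel + 1) node st).1 =
      (if ((PySem.Dict.mk children).getD node []).isEmpty then ((fuel, st) : Nat × (List Int × List Int))
       else
        (pvDfsAFold children fuel ((PySem.Dict.mk children).getD node [])
          (PySem.List.pySetD st.1 node (PySem.List.pyGetD ((PySem.Dict.mk children).getD node []) 0 0),
           (PySem.List.pyRange 0 ((((PySem.Dict.mk children).getD node []).length : Int) - 1) 1).foldl
             (fun a i => PySem.List.pySetD a
               (PySem.List.pyGetD ((PySem.Dict.mk children).getD node []) i 0)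
               (PySem.List.pyGetD ((PySem.Dict.mk children).getD node []) (i+1) 0)) st.2)).1) := by
  rw [pvDfsA]
  split <;> rfl

lemma pv_foldA_nil (children : List (Int × List Int)) (fuel : Nat) (st : List Int × List Int) :
    (pvDfsAFold children fuel [] st).1 = (fuel, st) := by simp [pvDfsAFold]

lemma pv_foldA_cons (children : List (Int × List Int)) (fuel : Nat) (c : Int) (rest : List Int)
    (st : List Int × List Int) :
    (pvDfsAFold children fuel (c :: rest) st).1
      = (pvDfsAFold children (pvDfsA children fuel c st).1.1 rest (pvDfsA children fuel c st).1.2).1 := by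
  rw [pvDfsAFold]

lemma pv_foldA_zero (children : List (Int × List Int)) :
    ∀ (l : List Int) (st : List Int × List Int),
      (pvDfsAFold children 0 l st).1 = (0, st) := by
  intro l
  induction l with
  | nil => intro st; exact pv_foldA_nil children 0 st
  | cons c rest ih => intro st; rw [pv_foldA_cons, pv_dfsA_zero]; exact ih st

lemma pv_foldA_append (children : List (Int × List Int)) :
    ∀ (l1 l2 : List Int) (fuel : Nat) (st : List Int × List Int),
      (pvDfsAFold children fuel (l1 ++ l2) st).1
        = (pvDfsAFold children (pvDfsAFold children fuel l1 st).1.1 l2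
             (pvDfsAFold children fuel l1 st).1.2).1 := by
  intro l1
  induction l1 with
  | nil => intro l2 fuel st; rw [List.nil_append, pv_foldA_nil]
  | cons c r ih =>
    intro l2 fuel st
    rw [List.cons_append, pv_foldA_cons, pv_foldA_cons, ih]

-- the stack machine of B computes exactly the threaded fold of A's dfs over the stack
lemma pv_runB_eq_foldA (children : List (Int × List Int)) :
    ∀ (fuel : Nat) (stack : List Int) (st : List Int × List Int),
      pvRunB children fuel stack st = (pvDfsAFold children fuel stack st).1.2 := by
  intro fuel
  induction fuel with
  | zero =>
    intro stack st
    cases stack with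
    | nil => rw [pv_foldA_nil]; rfl
    | cons c rest => rw [pv_foldA_zero]; rfl
  | succ fuel ih =>
    intro stack st
    cases stack with
    | nil => rw [pv_foldA_nil]; rfl
    | cons node rest =>
      rw [pv_foldA_cons, pv_dfsA_succ]
      by_cases h : ((PySem.Dict.mk children).getD node []).isEmpty
      · rw [if_pos h]
        show pvRunB children (fuel + 1) (node :: rest) st = _
        rw [pvRunB]
        simp only [h, if_pos]
        exact ih rest st
      · rw [if_neg h]
        show pvRunB children (fuel + 1) (node :: rest) st = _
        rw [pvRunB]
        simp only [h, Bool.false_eq_true, if_neg, not_false_eq_true]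
        rw [ih, pv_ns_eq, ← pv_foldA_append]

-- ===== VERDICT (by name: the statement is the Claim_ definition above) =====
theorem fcns_representation_spec : Claim_equal_fcns_representation := by
  intro root children n _ _
  unfold Spec_fcns_representation fcns_representation fcns_representation_alt
  rw [pv_runB_eq_foldA, pv_foldA_cons, pv_foldA_nil]
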